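-- pv_equiv track=rewrite | github.com/Lucia-azd/Pokedex | equipos.py | mostrar_movimientos
-- ===== SOURCE A (Python) =====
-- def mostrar_movimientos(lista_movimientos):
--     """ Muestra en pantalla los movimientos posibles para cada pokemon """
--     texto_imprimir = ""
--     for i in range(len(lista_movimientos)):
--         if not i % 6 == 0:
--             texto_imprimir += f" {lista_movimientos[i]} -"
--         else:
--             texto_imprimir += "\n"
--
--     return texto_imprimir
-- ===== SOURCE B (Python) =====
-- def mostrar_movimientos(lista_movimientos):
--     """ Muestra en pantalla los movimientos posibles para cada pokemon """
--     # One pass over 6-element blocks: each block contributes a leading "\n"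
--     # (its first slot) followed by ' <move> -' for its remaining up-to-5 moves.
--     partes = []
--     for k in range(0, len(lista_movimientos), 6):
--         bloque = lista_movimientos[k + 1:k + 6]
--         partes.append("\n" + "".join(f" {m} -" for m in bloque))
--     return "".join(partes)
-- ===== Notes on version B (the rewrite author's own statement) =====
-- stated objective: alternative
-- what changed: Replaces the flat index loop with its i%6 test by a two-level pass over 6-element blocks: for each block start k it emits '\n' plus the joined pieces ' <move> -' of lista[k+1:k+6], then joins the per-block strings; no per-element index arithmetic or modulus remains.
import Mathlib
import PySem

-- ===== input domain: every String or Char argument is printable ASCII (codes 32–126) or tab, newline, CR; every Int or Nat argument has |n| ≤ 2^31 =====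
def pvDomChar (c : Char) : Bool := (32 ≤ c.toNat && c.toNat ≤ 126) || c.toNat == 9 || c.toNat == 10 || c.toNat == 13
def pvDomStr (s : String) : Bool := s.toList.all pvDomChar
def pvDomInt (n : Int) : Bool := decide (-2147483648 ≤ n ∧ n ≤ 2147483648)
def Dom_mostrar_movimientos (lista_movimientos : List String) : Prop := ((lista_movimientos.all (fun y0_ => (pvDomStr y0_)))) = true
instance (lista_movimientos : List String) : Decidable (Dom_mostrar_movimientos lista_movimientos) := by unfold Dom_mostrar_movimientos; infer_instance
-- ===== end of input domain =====

-- B replaces A's flat index loop with its i % 6 test by a two-level pass over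
-- 6-element blocks ('\n' plus the joined pieces of the block's remaining moves);
-- same cost, different decomposition (objective: alternative).

-- ===== PORT A =====
def mostrar_movimientos (lista_movimientos : List String) : String :=
  (PySem.List.pyRange 0 (PySem.List.len lista_movimientos) 1).foldl
    (fun texto_imprimir i =>
      if !(PySem.Int.mod i 6 == 0) then
        texto_imprimir ++ (" " ++ PySem.List.pyGetD lista_movimientos i "" ++ " -")
      else
        texto_imprimir ++ "\n")
    ""

-- ===== PORT B =====
-- bloque = lista[k+1:k+6] is PySem.List.slice with nonnegative bounds;
-- partes.append(...) in the loop is the foldl, "".join is PySem.Str.join ""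
def mostrar_movimientos_alt (lista_movimientos : List String) : String :=
  PySem.Str.join ""
    ((PySem.List.pyRange 0 (PySem.List.len lista_movimientos) 6).foldl
      (fun partes k =>
        partes ++ ["\n" ++ PySem.Str.join ""
          ((PySem.List.slice lista_movimientos (some (k + 1)) (some (k + 6))).map
            (fun m => " " ++ m ++ " -"))])
      [])

-- ===== PRECONDITION & SPEC =====
def Spec_mostrar_movimientos (lista_movimientos : List String) (out : String) : Prop := out = mostrar_movimientos_alt lista_movimientos
instance (lista_movimientos : List String) (out : String) : Decidable (Spec_mostrar_movimientos lista_movimientos out) := by unfold Spec_mostrar_movimientos; infer_instance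

-- ===== CLAIM (what is proved, stated in full; the proofs are below) =====
def Claim_equal_mostrar_movimientos : Prop := ∀ (lista_movimientos : List String), Dom_mostrar_movimientos lista_movimientos → Spec_mostrar_movimientos lista_movimientos (mostrar_movimientos lista_movimientos)

-- ===== LEMMAS AND PROOFS =====

-- front-to-back reading of A: at absolute index k, emit '\n' when k % 6 = 0,
-- else the piece ' m -' for the current move m
def specA : Nat → List String → String
  | _, [] => ""
  | k, m :: rest => (if k % 6 = 0 then "\n" else " " ++ m ++ " -") ++ specA (k + 1) rest

theorem strJoin_empty_nil : PySem.Str.join "" ([] : List String) = "" := by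
  simp [PySem.Str.join, PySem.Chars.join_nil]

theorem strJoin_empty_cons (a : String) (l : List String) :
    PySem.Str.join "" (a :: l) = a ++ PySem.Str.join "" l := by
  cases l with
  | nil =>
    rw [strJoin_empty_nil, String.append_empty]
    simp [PySem.Str.join, PySem.Chars.join_singleton, String.ofList_toList]
  | cons b r =>
    simp only [PySem.Str.join, List.map_cons, PySem.Chars.join_cons_cons,
      List.append_nil, String.ofList_append, String.ofList_toList, String.append_empty]

theorem getD_append_length (pre : List String) (m : String) (rest : List String) :
    (pre ++ m :: rest).getD pre.length "" = m := by
  induction pre with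
  | nil => rfl
  | cons p ps ih => simpa using ih

theorem foldl_specA (zs : List String) :
    ∀ (ys pre : List String) (acc : String), pre ++ ys = zs →
    (List.range' pre.length ys.length).foldl
      (fun acc k => acc ++ (if k % 6 = 0 then "\n" else " " ++ zs.getD k "" ++ " -")) acc
    = acc ++ specA pre.length ys := by
  intro ys
  induction ys with
  | nil => intro pre acc _; simp [specA, String.append_empty]
  | cons m rest ih =>
    intro pre acc h
    rw [List.length_cons, List.range'_succ, List.foldl_cons]
    have hz : zs.getD pre.length "" = m := by rw [← h, getD_append_length]
    have h' : (pre ++ [m]) ++ rest = zs := by simpa using h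
    have := ih (pre ++ [m]) (acc ++ (if pre.length % 6 = 0 then "\n" else " " ++ zs.getD pre.length "" ++ " -")) h'
    simp only [List.length_append, List.length_cons, List.length_nil, Nat.add_zero] at this
    rw [this, hz, specA, String.append_assoc]

theorem A_eq_specA (xs : List String) : mostrar_movimientos xs = specA 0 xs := by
  unfold mostrar_movimientos
  rw [PySem.List.len_eq, PySem.List.pyRange_zero_nat, List.foldl_map]
  have hf : (fun (acc : String) (k : Nat) =>
      if !(PySem.Int.mod (↑k) 6 == 0) then
        acc ++ (" " ++ PySem.List.pyGetD xs (↑k) "" ++ " -")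
      else acc ++ "\n")
      = fun acc k => acc ++ (if k % 6 = 0 then "\n" else " " ++ xs.getD k "" ++ " -") := by
    funext acc k
    have h6 : PySem.Int.mod (↑k) 6 = ((k % 6 : Nat) : Int) := by
      rw [PySem.Int.mod_eq_emod_of_pos (by norm_num)]; omega
    rw [h6, PySem.List.pyGetD_natCast]
    by_cases h : k % 6 = 0
    · simp [h]
    · have h' : ¬ (6 : Int) ∣ (k : Int) := by omega
      simp [h, h']
  rw [hf, List.range_eq_range']
  exact foldl_specA xs xs [] "" rfl

theorem specA_add_six : ∀ (xs : List String) (k : Nat), specA (k + 6) xs = specA k xs := by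
  intro xs
  induction xs with
  | nil => intro k; rfl
  | cons m rest ih =>
    intro k
    rw [specA, specA, Nat.add_mod_right]
    have : k + 6 + 1 = (k + 1) + 6 := by omega
    rw [this, ih (k + 1)]

theorem specA_block : ∀ (d j : Nat) (rest : List String), j + d = 6 → 1 ≤ j →
    specA j rest
      = PySem.Str.join "" ((rest.take d).map (fun m => " " ++ m ++ " -"))
        ++ specA 0 (rest.drop d) := by
  intro d
  induction d with
  | zero =>
    intro j rest hj _
    have : j = 6 := by omega
    subst this
    have h6 : specA 6 rest = specA 0 rest := specA_add_six rest 0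
    simp [h6, strJoin_empty_nil, String.empty_append]
  | succ d ih =>
    intro j rest hj hj1
    cases rest with
    | nil => simp [specA, strJoin_empty_nil, String.append_empty]
    | cons m r =>
      have hjlt : j % 6 = j := Nat.mod_eq_of_lt (by omega)
      rw [specA, hjlt, if_neg (by omega)]
      rw [ih (j + 1) r (by omega) (by omega)]
      rw [List.take_succ_cons, List.map_cons, strJoin_empty_cons, List.drop_succ_cons]
      simp [String.append_assoc]

theorem pyRange6_cons (a b : Int) (h : a < b) :
    PySem.List.pyRange a b 6 = a :: PySem.List.pyRange (a + 6) b 6 := by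
  rw [PySem.List.pyRange_of_pos a b (by norm_num), PySem.List.pyRange_of_pos (a + 6) b (by norm_num)]
  by_cases h6 : a + 6 < b
  · rw [if_pos h, if_pos h6]
    have hc : ((b - a + 6 - 1) / 6).toNat = ((b - (a + 6) + 6 - 1) / 6).toNat + 1 := by omega
    rw [hc, List.range_succ_eq_map, List.map_cons, List.map_map]
    refine congrArg₂ _ (by ring_nf) ?_
    refine List.map_congr_left ?_
    intro k _; simp [Function.comp]; ring
  · rw [if_pos h, if_neg h6]
    have hc : ((b - a + 6 - 1) / 6).toNat = 1 := by omega
    rw [hc]; simp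

theorem pyRange6_nil (a b : Int) (h : b ≤ a) : PySem.List.pyRange a b 6 = [] := by
  rw [PySem.List.pyRange_of_pos a b (by norm_num), if_neg (by omega)]; simp

-- the per-block map shifted past the first block of xs reads blocks of xs.drop 6
theorem tail_shift (xs : List String) (a b : Int) (ha : 0 ≤ a) :
    (PySem.List.pyRange (a + 6) b 6).map
      (fun k => "\n" ++ PySem.Str.join ""
        ((PySem.List.slice xs (some (k + 1)) (some (k + 6))).map (fun m => " " ++ m ++ " -")))
    = (PySem.List.pyRange a (b - 6) 6).map
      (fun k => "\n" ++ PySem.Str.join ""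
        ((PySem.List.slice (xs.drop 6) (some (k + 1)) (some (k + 6))).map (fun m => " " ++ m ++ " -"))) := by
  by_cases hab : b - 6 ≤ a
  · rw [pyRange6_nil _ _ (by omega), pyRange6_nil _ _ hab]
    rfl
  · rw [pyRange6_cons (a + 6) b (by omega), pyRange6_cons a (b - 6) (by omega),
      List.map_cons, List.map_cons]
    have hhead : PySem.List.slice xs (some (a + 6 + 1)) (some (a + 6 + 6))
        = PySem.List.slice (xs.drop 6) (some (a + 1)) (some (a + 6)) := by
      rw [PySem.List.slice_toNat xs (by omega) (by omega),
        PySem.List.slice_toNat (xs.drop 6) (by omega) (by omega), List.drop_drop]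
      congr 1
      · omega
      · congr 1
        omega
    rw [hhead, tail_shift xs (a + 6) b (by omega)]
termination_by (b - a).toNat
decreasing_by omega

-- B satisfies the same block equations as specA's chunking
theorem alt_nil : mostrar_movimientos_alt [] = "" := by
  unfold mostrar_movimientos_alt
  rw [PySem.List.len_eq]
  simp [pyRange6_nil 0 0 (by norm_num), strJoin_empty_nil]

theorem alt_cons (x : String) (rest : List String) :
    mostrar_movimientos_alt (x :: rest)
      = "\n" ++ PySem.Str.join "" ((rest.take 5).map (fun m => " " ++ m ++ " -"))
          ++ mostrar_movimientos_alt (rest.drop 5) := by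
  unfold mostrar_movimientos_alt
  rw [PySem.List.foldl_append_singleton_eq_map, List.nil_append, PySem.List.len_eq]
  rw [pyRange6_cons 0 (↑(x :: rest).length) (by simp), List.map_cons, strJoin_empty_cons]
  have hhead : PySem.List.slice (x :: rest) (some ((0 : Int) + 1)) (some ((0 : Int) + 6))
      = rest.take 5 := by
    rw [PySem.List.slice_toNat (x :: rest) (by norm_num) (by norm_num)]
    have e1 : ((0 : Int) + 1).toNat = 1 := by norm_num
    have e2 : ((0 : Int) + 6).toNat = 6 := by decide
    rw [e1, e2]
    simp
  have hshift := tail_shift (x :: rest) 0 (↑(x :: rest).length) le_rfl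
  rw [hshift]
  have hdrop : (x :: rest).drop 6 = rest.drop 5 := by simp
  have hrange : PySem.List.pyRange 0 (↑(x :: rest).length - 6) 6
      = PySem.List.pyRange 0 ↑(rest.drop 5).length 6 := by
    by_cases h5 : 5 ≤ rest.length
    · have h6 : (↑(x :: rest).length - 6 : Int) = ↑(rest.drop 5).length := by simp; omega
      rw [h6]
    · rw [pyRange6_nil 0 _ (by simp; omega), pyRange6_nil 0 _ (by simp; omega)]
  rw [hhead, hdrop, hrange, PySem.List.foldl_append_singleton_eq_map, List.nil_append,
    PySem.List.len_eq]

theorem specA_eq_alt (xs : List String) : specA 0 xs = mostrar_movimientos_alt xs := by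
  cases xs with
  | nil => rw [alt_nil]; rfl
  | cons x rest =>
    rw [alt_cons, specA, if_pos (by norm_num),
      specA_block 5 1 rest (by norm_num) (by norm_num),
      specA_eq_alt (rest.drop 5), String.append_assoc]
termination_by xs.length
decreasing_by simp

-- ===== VERDICT (by name: the statement is the Claim_ definition above) =====
theorem mostrar_movimientos_spec : Claim_equal_mostrar_movimientos := by
  intro xs _
  unfold Spec_mostrar_movimientos
  rw [A_eq_specA, specA_eq_alt]
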